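-- pv_equiv track=rewrite | github.com/liupengsay/PyIsTheBestLang | src/data_structure/sparse_table/problem.py | lc_2836
-- ===== SOURCE A (Python) =====
-- from typing import List
--
-- def lc_2836(nex: List[int], k: int) -> int:
--     """
--     url:https://leetcode.cn/problems/maximize-value-of-function-in-a-ball-passing-game/
--     tag: multiplication_method|classical|can_not_be_circular_section|can_not_to_be_permutation_circle
--     """
--     n = len(nex)
--     ans = list(range(n))
--     pos = list(range(n))
--     s = nex[:]
--     while k:
--         if k & 1:
--             ans = [ans[i] + s[pos[i]] for i in range(n)]
--             pos = [nex[i] for i in pos]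
--         k >>= 1
--         s = [s[i] + s[nex[i]] for i in range(n)]
--         nex = [nex[i] for i in nex]
--     return max(ans)
-- ===== SOURCE B (Python) =====
-- from typing import List
--
-- def lc_2836(nex: List[int], k: int) -> int:
--     # Binary-lifting table built once (levels j), then an independent
--     # per-start query loop over the bits of k; max kept with a running best.
--     n = len(nex)
--     up = nex[:]
--     sm = nex[:]
--     tables = []
--     kk = k
--     while kk > 0:
--         tables.append((up, sm))
--         kk >>= 1
--         if kk:
--             sm = [sm[i] + sm[up[i]] for i in range(n)]
--             up = [up[up[i]] for i in range(n)]
--     best = None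
--     for x in range(n):
--         total = x
--         cur = x
--         kk = k
--         for u, s in tables:
--             if kk & 1:
--                 total += s[cur]
--                 cur = u[cur]
--             kk >>= 1
--         if best is None or total > best:
--             best = total
--     return best
-- ===== Notes on version B (the rewrite author's own statement) =====
-- stated objective: alternative
-- what changed: A accumulates per-start answers inside the doubling loop by rewriting whole ans/pos arrays at each set bit; B first builds the binary-lifting table (jump/sum per level) once, then answers every start index with an independent per-node query fold over the bits of k, keeping a running best.
import Mathlib
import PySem

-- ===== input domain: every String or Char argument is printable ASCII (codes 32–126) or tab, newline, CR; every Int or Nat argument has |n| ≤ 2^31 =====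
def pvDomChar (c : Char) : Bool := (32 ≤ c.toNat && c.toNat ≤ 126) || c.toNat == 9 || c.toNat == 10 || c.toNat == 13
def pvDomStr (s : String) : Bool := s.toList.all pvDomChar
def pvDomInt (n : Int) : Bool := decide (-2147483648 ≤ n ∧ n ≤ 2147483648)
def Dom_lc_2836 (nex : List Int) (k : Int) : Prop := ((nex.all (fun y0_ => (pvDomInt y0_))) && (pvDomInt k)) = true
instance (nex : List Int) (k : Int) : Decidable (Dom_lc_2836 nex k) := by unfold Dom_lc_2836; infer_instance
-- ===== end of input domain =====

-- B replaces A's in-loop vector accumulation by a precomputed binary-lifting table plus an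
-- independent per-start query loop (objective: alternative decomposition, same cost).

-- ===== PORT A =====
-- while k: loop of A, recursion on k (guard k ≤ 0 makes it total; Python diverges for k < 0,
-- excluded by Pre_).  i ranges over range(n) with all lists of length n, so xs[i] is List.getD;
-- indexing by a stored (possibly negative) value v is PySem.List.pyGetD (exact under Pre_).
-- k & 1 is PySem.Int.mod k 2 = 1 and k >>= 1 is PySem.Int.floordiv k 2 (exact for k > 0).
def lcLoopA (n : Nat) (ans pos s nex : List Int) (k : Int) : List Int :=
  if _h : k ≤ 0 then ans
  else
    let ans' := if PySem.Int.mod k 2 = 1 then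
        (List.range n).map (fun i => ans.getD i 0 + PySem.List.pyGetD s (pos.getD i 0) 0)
      else ans
    let pos' := if PySem.Int.mod k 2 = 1 then
        pos.map (fun p => PySem.List.pyGetD nex p 0)
      else pos
    let k' := PySem.Int.floordiv k 2
    let s' := (List.range n).map (fun i => s.getD i 0 + PySem.List.pyGetD s (nex.getD i 0) 0)
    let nex' := nex.map (fun v => PySem.List.pyGetD nex v 0)
    lcLoopA n ans' pos' s' nex' k'
termination_by k.toNat
decreasing_by
  rw [PySem.Int.floordiv_eq_ediv_of_pos (by omega : (0:Int) < 2)]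
  omega

def lc_2836 (nex : List Int) (k : Int) : Int :=
  let n := nex.length
  let ans := (List.range n).map (fun i => Int.ofNat i)
  let pos := (List.range n).map (fun i => Int.ofNat i)
  -- s = nex[:] is nex; max(ans) is PySem.List.max? (Python raises on [], excluded by Pre_)
  (PySem.List.max? (lcLoopA n ans pos nex nex k) (fun y => y)).getD 0

-- ===== PORT B =====
-- one step of Source B's inner query loop: state (total, cur, kk), table entry (u, s)
def lcQStep (st : Int × Int × Int) (t : List Int × List Int) : Int × Int × Int :=
  if PySem.Int.mod st.2.2 2 = 1 then
    (st.1 + PySem.List.pyGetD t.2 st.2.1 0, PySem.List.pyGetD t.1 st.2.1 0,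
     PySem.Int.floordiv st.2.2 2)
  else (st.1, st.2.1, PySem.Int.floordiv st.2.2 2)

-- Source B's `while kk > 0` table-building loop
def lcTableB (n : Nat) (up sm : List Int) (kk : Int) : List (List Int × List Int) :=
  if _h : kk ≤ 0 then []
  else
    let kk' := PySem.Int.floordiv kk 2
    if 0 < kk' then
      let sm' := (List.range n).map (fun i => sm.getD i 0 + PySem.List.pyGetD sm (up.getD i 0) 0)
      let up' := (List.range n).map (fun i => PySem.List.pyGetD up (up.getD i 0) 0)
      (up, sm) :: lcTableB n up' sm' kk'
    else [(up, sm)]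
termination_by kk.toNat
decreasing_by
  rw [PySem.Int.floordiv_eq_ediv_of_pos (by omega : (0:Int) < 2)]
  omega

def lc_2836_alt (nex : List Int) (k : Int) : Int :=
  let n := nex.length
  let tables := lcTableB n nex nex k
  ((List.range n).foldl (fun best x =>
      let r := tables.foldl lcQStep (Int.ofNat x, Int.ofNat x, k)
      match best with
      | none => some r.1
      | some b => some (if r.1 > b then r.1 else b)) (none : Option Int)).getD 0

-- ===== PRECONDITION & SPEC =====
-- Exactly where Python A returns normally: max([]) raises ValueError on nex = []; the while
-- loop diverges for k < 0; and for k > 0 the update s[nex[i]] raises IndexError unless every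
-- entry of nex is a valid (possibly negative, wrap-around) index (for k = 0 the loop body
-- never runs, so A returns whatever the entries are).
def Pre_lc_2836 (nex : List Int) (k : Int) : Prop :=
  nex ≠ [] ∧ 0 ≤ k ∧
    (k = 0 ∨ ∀ v ∈ nex, -(nex.length : Int) ≤ v ∧ v < (nex.length : Int))
instance (nex : List Int) (k : Int) : Decidable (Pre_lc_2836 nex k) := by
  unfold Pre_lc_2836; infer_instance
def pvWitness_lc_2836 : List Int × Int := ([2, 0, 1, -1], 6)

def Spec_lc_2836 (nex : List Int) (k : Int) (out : Int) : Prop := out = lc_2836_alt nex k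
instance (nex : List Int) (k : Int) (out : Int) : Decidable (Spec_lc_2836 nex k out) := by
  unfold Spec_lc_2836; infer_instance

-- ===== CLAIM (what is proved, stated in full; the proofs are below) =====
def Claim_equal_lc_2836 : Prop := ∀ (nex : List Int) (k : Int), Dom_lc_2836 nex k → Pre_lc_2836 nex k → Spec_lc_2836 nex k (lc_2836 nex k)

-- ===== LEMMAS AND PROOFS =====

-- (range L.length).map (fun i => f (L.getD i 0)) is just L.map f
lemma map_getD_range {α β : Type} [Inhabited α] (L : List α) (f : α → β) (d : α) :
    (List.range L.length).map (fun i => f (L.getD i d)) = L.map f := by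
  apply List.ext_getElem
  · simp
  · intro i h1 h2
    simp only [List.length_map] at h2
    simp [List.getD, h2]

lemma getD_map' {α β : Type} (L : List α) (f : α → β) (i : Nat) (hi : i < L.length)
    (d : β) (d' : α) : (L.map f).getD i d = f (L.getD i d') := by
  simp [List.getD, hi]

lemma getD_map_range' {β : Type} (n : Nat) (f : Nat → β) (i : Nat) (hi : i < n) (d : β) :
    ((List.range n).map f).getD i d = f i := by
  simp [List.getD, hi]

-- A's whole loop equals, pointwise per start index, B's per-start fold over B's table.
lemma loopA_eq_query (n : Nat) :
    ∀ (m : Nat) (k : Int), k.toNat = m →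
    ∀ (ans pos s nex : List Int), ans.length = n → pos.length = n → nex.length = n →
    lcLoopA n ans pos s nex k =
      (List.range n).map (fun i =>
        ((lcTableB n nex s k).foldl lcQStep (ans.getD i 0, pos.getD i 0, k)).1) := by
  intro m
  induction m using Nat.strong_induction_on with
  | _ m IH =>
    intro k hk ans pos s nex hans hpos hnex
    by_cases hk0 : k ≤ 0
    · rw [lcLoopA, lcTableB]
      simp only [dif_pos hk0, List.foldl_nil]
      calc ans = ans.map (fun x => x) := by simp
        _ = (List.range ans.length).map (fun i => ans.getD i 0) := (map_getD_range ans _ 0).symm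
        _ = _ := by rw [hans]
    · have hkpos : 0 < k := by omega
      have hfd : PySem.Int.floordiv k 2 = k / 2 :=
        PySem.Int.floordiv_eq_ediv_of_pos (by omega)
      rw [lcLoopA, lcTableB]
      simp only [dif_neg hk0]
      by_cases hk2 : 0 < PySem.Int.floordiv k 2
      · simp only [if_pos hk2]
        rw [IH (PySem.Int.floordiv k 2).toNat (by omega) _ rfl _ _ _ _
            (by split <;> simp [hans])
            (by split <;> simp [hpos])
            (by simp [hnex])]
        have hm : PySem.Int.mod k 2 = k % 2 := PySem.Int.mod_eq_emod_of_pos (by omega)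
        have hnexmap : List.map (fun p => PySem.List.pyGetD nex p 0)
            nex = (List.range n).map (fun j => PySem.List.pyGetD nex (nex.getD j 0) 0) := by
          conv_lhs => rw [← map_getD_range nex (fun p => PySem.List.pyGetD nex p 0) 0]
          rw [hnex]
        rw [hnexmap]
        apply List.map_congr_left
        intro i hi
        rw [List.mem_range] at hi
        simp only [List.foldl_cons]
        congr 1
        by_cases h : PySem.Int.mod k 2 = 1
        · have h' : k % 2 = 1 := by rw [← hm]; exact h
          rw [if_pos h, if_pos h, getD_map_range' n _ i hi,
            getD_map' pos _ i (by omega) (0:Int) (0:Int)]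
          simp [lcQStep, h']
        · have h' : ¬ k % 2 = 1 := by rw [← hm]; exact h
          rw [if_neg h, if_neg h]
          simp [lcQStep, h']
      · simp only [if_neg hk2]
        rw [lcLoopA]
        have : PySem.Int.floordiv k 2 ≤ 0 := by omega
        simp only [dif_pos this]
        have hk1 : k = 1 := by omega
        subst hk1
        have hmod : PySem.Int.mod (1 : Int) 2 = 1 := by decide
        rw [if_pos hmod]
        apply List.map_congr_left
        intro i hi
        simp [lcQStep]

-- Python's max(l) as the running strict-> option fold of Source B
lemma foldl_opt_max (t : List Int) : ∀ (x : Int),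
    t.foldl (fun b y => match b with
      | none => some y
      | some b => some (if y > b then y else b)) (some x) = some (t.foldl max x) := by
  induction t with
  | nil => intro x; simp
  | cons y t ih =>
    intro x
    simp only [List.foldl_cons]
    rw [show (if y > x then y else x) = max x y by
      by_cases h : x < y <;> simp [max_def] <;> omega]
    exact ih (max x y)

lemma max?_eq_optfold (l : List Int) :
    PySem.List.max? l (fun y => y) = l.foldl (fun b y => match b with
      | none => some y
      | some b => some (if y > b then y else b)) none := by
  cases l with
  | nil => simp [PySem.List.max?]
  | cons x t =>
    rw [PySem.List.max?_id_cons]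
    simp only [List.foldl_cons]
    exact (foldl_opt_max t x).symm

lemma lc_2836_eq_alt (nex : List Int) (k : Int) : lc_2836 nex k = lc_2836_alt nex k := by
  unfold lc_2836 lc_2836_alt
  dsimp only
  rw [loopA_eq_query nex.length k.toNat k rfl _ _ _ _ (by simp) (by simp) rfl]
  have hmap : (List.range nex.length).map (fun i =>
        ((lcTableB nex.length nex nex k).foldl lcQStep
          ((((List.range nex.length).map (fun j => Int.ofNat j)).getD i 0),
           (((List.range nex.length).map (fun j => Int.ofNat j)).getD i 0), k)).1)
      = (List.range nex.length).map (fun i : Nat =>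
        ((lcTableB nex.length nex nex k).foldl lcQStep (Int.ofNat i, Int.ofNat i, k)).1) := by
    apply List.map_congr_left
    intro i hi
    rw [List.mem_range] at hi
    rw [getD_map_range' _ _ i hi]
  rw [hmap, max?_eq_optfold, List.foldl_map]

-- ===== VERDICT (by name: the statement is the Claim_ definition above) =====
theorem lc_2836_spec : Claim_equal_lc_2836 := by
  intro nex k _ _
  unfold Spec_lc_2836
  exact lc_2836_eq_alt nex k
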